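-- pv_equiv track=rewrite | github.com/Yuvrender-Gill/Reddit-Sentiment-Analyzer | a1_extractFeatures.py | first_person_pronouns
-- ===== SOURCE A (Python) =====
-- def first_person_pronouns(token_list):
--     """
--     Returns the number of first person words used in the given comment.
--     :param token_list
--     :return:
--     """
--     first_person_words = ['i', 'me', 'my', 'mine', 'we', 'us', 'our', 'ours']
--     count = 0
--     for item in token_list:
--         # Check all the cases 1. lower 2. title 3.Upper
--         if ((item.title() in first_person_words) or
--                 (item.lower() in first_person_words) or
--                 (item in first_person_words) or
--                 (item.upper() in first_person_words)):
--             count += 1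
--     return count
-- ===== SOURCE B (Python) =====
-- def first_person_pronouns(token_list):
--     """
--     Returns the number of first person words used in the given comment.
--     (Only the lowercase form can ever match the all-lowercase word list, so
--     one frequency table of lowercased tokens suffices.)
--     """
--     first_person_words = ['i', 'me', 'my', 'mine', 'we', 'us', 'our', 'ours']
--     freq = {}
--     for item in token_list:
--         key = item.lower()
--         freq[key] = freq.get(key, 0) + 1
--     return sum(freq.get(word, 0) for word in first_person_words)
-- ===== Notes on version B (the rewrite author's own statement) =====
-- stated objective: faster
-- what changed: Instead of testing title/lower/self/upper membership of every token against the pronoun list (only the lower() test can ever match an all-lowercase word), B builds a frequency table of lowercased tokens in one pass and then sums the counts of the 8 fixed pronouns, inverting the traversal.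
import Mathlib
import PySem

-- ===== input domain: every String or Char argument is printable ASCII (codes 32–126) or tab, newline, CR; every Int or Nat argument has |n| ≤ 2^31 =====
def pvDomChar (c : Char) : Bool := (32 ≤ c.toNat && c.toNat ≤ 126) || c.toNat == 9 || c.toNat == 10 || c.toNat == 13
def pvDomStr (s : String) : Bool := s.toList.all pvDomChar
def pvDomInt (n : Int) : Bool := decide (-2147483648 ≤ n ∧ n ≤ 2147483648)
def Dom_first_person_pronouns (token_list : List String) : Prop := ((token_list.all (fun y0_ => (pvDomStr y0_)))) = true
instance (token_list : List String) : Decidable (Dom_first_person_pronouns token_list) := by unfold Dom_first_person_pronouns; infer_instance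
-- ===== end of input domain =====

-- B replaces A's four-way case-variant membership test per token with one frequency table of
-- lowercased tokens plus eight lookups (objective: faster by a constant factor).

-- ===== PORT A =====
-- hand port of Python str.title() (no PySem primitive); exact on the ASCII domain, where
-- "cased" = ASCII letter: a letter after a non-letter is uppercased, a letter after a letter lowercased
def pvTitleChars : List Char → Bool → List Char
  | [], _ => []
  | c :: cs, prev =>
    (if PySem.Chars.isalpha c then
        (if prev then PySem.Chars.lowerChar c else PySem.Chars.upperChar c)
      else c) :: pvTitleChars cs (PySem.Chars.isalpha c)

def pvTitle (s : String) : String := String.ofList (pvTitleChars s.toList false)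

def first_person_pronouns (token_list : List String) : Int :=
  let first_person_words : List String := ["i", "me", "my", "mine", "we", "us", "our", "ours"]
  token_list.foldl
    (fun count item =>
      if (pvTitle item ∈ first_person_words) ∨
         (PySem.Str.lower item ∈ first_person_words) ∨
         (item ∈ first_person_words) ∨
         (PySem.Str.upper item ∈ first_person_words)
      then count + 1 else count)
    0

-- ===== PORT B =====
def first_person_pronouns_alt (token_list : List String) : Int :=
  let first_person_words : List String := ["i", "me", "my", "mine", "we", "us", "our", "ours"]
  let freq : PySem.Dict String Int :=
    token_list.foldl
      (fun d item =>
        let key := PySem.Str.lower item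
        d.insert key (d.getD key 0 + 1))
      PySem.Dict.empty
  (first_person_words.map (fun word => freq.getD word 0)).sum

-- ===== PRECONDITION & SPEC =====
def Spec_first_person_pronouns (token_list : List String) (out : Int) : Prop := out = first_person_pronouns_alt token_list
instance (token_list : List String) (out : Int) : Decidable (Spec_first_person_pronouns token_list out) := by unfold Spec_first_person_pronouns; infer_instance

-- ===== CLAIM (what is proved, stated in full; the proofs are below) =====
def Claim_equal_first_person_pronouns : Prop := ∀ (token_list : List String), Dom_first_person_pronouns token_list → Spec_first_person_pronouns token_list (first_person_pronouns token_list)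

-- ===== LEMMAS AND PROOFS =====

lemma pv_islower_iff (c : Char) : PySem.Chars.islower c = true ↔ (97 ≤ c.toNat ∧ c.toNat ≤ 122) := by
  simp [PySem.Chars.islower, Char.le_def, UInt32.le_iff_toNat_le]

lemma pv_isupper_iff (c : Char) : PySem.Chars.isupper c = true ↔ (65 ≤ c.toNat ∧ c.toNat ≤ 90) := by
  simp [PySem.Chars.isupper, Char.le_def, UInt32.le_iff_toNat_le]

lemma pv_toNat_ofNat (n : Nat) (h : n < 55296) : (Char.ofNat n).toNat = n := by
  simp [Char.toNat_ofNat, h]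

lemma pv_ne_of_toNat_ne (a b : Char) (h : a.toNat ≠ b.toNat) : a ≠ b :=
  fun heq => h (by rw [heq])

-- upperChar never produces a lowercase ASCII letter
lemma pv_upperChar_ne (c d : Char) (h1 : 97 ≤ d.toNat) (h2 : d.toNat ≤ 122) :
    PySem.Chars.upperChar c ≠ d := by
  unfold PySem.Chars.upperChar
  by_cases hc : PySem.Chars.islower c = true
  · have hcb := (pv_islower_iff c).mp hc
    rw [if_pos hc]
    apply pv_ne_of_toNat_ne
    rw [pv_toNat_ofNat _ (by omega)]
    omega
  · rw [if_neg hc]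
    rw [pv_islower_iff] at hc
    exact pv_ne_of_toNat_ne _ _ (by omega)

-- the head produced by title-casing a word start is never a lowercase ASCII letter
lemma pv_title_head_ne (c d : Char) (h1 : 97 ≤ d.toNat) (h2 : d.toNat ≤ 122) :
    (if PySem.Chars.isalpha c then PySem.Chars.upperChar c else c) ≠ d := by
  by_cases ha : PySem.Chars.isalpha c = true
  · rw [if_pos ha]
    exact pv_upperChar_ne c d h1 h2
  · rw [if_neg ha]
    unfold PySem.Chars.isalpha at ha
    rw [Bool.or_eq_true, pv_isupper_iff, pv_islower_iff] at ha
    apply pv_ne_of_toNat_ne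
    omega

lemma pv_titleChars_ne (l : List Char) (d : Char) (rest : List Char)
    (h : pvTitleChars l false = d :: rest) (h1 : 97 ≤ d.toNat) (h2 : d.toNat ≤ 122) : False := by
  cases l with
  | nil => simp [pvTitleChars] at h
  | cons c cs =>
    simp only [pvTitleChars, List.cons.injEq] at h
    exact pv_title_head_ne c d h1 h2 (by simpa using h.1)

lemma pv_upperChars_ne (l : List Char) (d : Char) (rest : List Char)
    (h : PySem.Chars.upper l = d :: rest) (h1 : 97 ≤ d.toNat) (h2 : d.toNat ≤ 122) : False := by
  cases l with
  | nil => simp [PySem.Chars.upper] at h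
  | cons c cs =>
    simp only [PySem.Chars.upper, List.map_cons, List.cons.injEq] at h
    exact pv_upperChar_ne c d h1 h2 h.1

lemma pv_title_not_mem (s : String) :
    pvTitle s ∉ (["i", "me", "my", "mine", "we", "us", "our", "ours"] : List String) := by
  intro h
  simp only [List.mem_cons, List.not_mem_nil, or_false] at h
  rcases h with h | h | h | h | h | h | h | h <;>
    · have h' := congrArg String.toList h
      simp only [pvTitle, String.toList_ofList] at h'
      exact pv_titleChars_ne _ _ _ (by simpa using h') (by decide) (by decide)

lemma pv_upper_not_mem (s : String) :
    PySem.Str.upper s ∉ (["i", "me", "my", "mine", "we", "us", "our", "ours"] : List String) := by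
  intro h
  simp only [List.mem_cons, List.not_mem_nil, or_false] at h
  rcases h with h | h | h | h | h | h | h | h <;>
    · have h' := congrArg String.toList h
      rw [PySem.Str.toList_upper] at h'
      exact pv_upperChars_ne _ _ _ (by simpa using h') (by decide) (by decide)

lemma pv_mem_lower (s : String)
    (h : s ∈ (["i", "me", "my", "mine", "we", "us", "our", "ours"] : List String)) :
    PySem.Str.lower s ∈ (["i", "me", "my", "mine", "we", "us", "our", "ours"] : List String) := by
  fin_cases h <;> decide

-- A's four-way test collapses to the lower() test
lemma pv_cond_iff (s : String) :
    ((pvTitle s ∈ (["i", "me", "my", "mine", "we", "us", "our", "ours"] : List String)) ∨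
     (PySem.Str.lower s ∈ (["i", "me", "my", "mine", "we", "us", "our", "ours"] : List String)) ∨
     (s ∈ (["i", "me", "my", "mine", "we", "us", "our", "ours"] : List String)) ∨
     (PySem.Str.upper s ∈ (["i", "me", "my", "mine", "we", "us", "our", "ours"] : List String))) ↔
    PySem.Str.lower s ∈ (["i", "me", "my", "mine", "we", "us", "our", "ours"] : List String) := by
  constructor
  · rintro (h | h | h | h)
    · exact absurd h (pv_title_not_mem s)
    · exact h
    · exact pv_mem_lower s h
    · exact absurd h (pv_upper_not_mem s)
  · intro h
    exact Or.inr (Or.inl h)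

-- splitting a membership count over a fresh head of the word list
lemma pv_countP_cons_split (w : String) (L : List String) (hw : w ∉ L) (xs : List String) :
    List.countP (fun x => decide (x ∈ w :: L)) xs
      = List.count w xs + List.countP (fun x => decide (x ∈ L)) xs := by
  induction xs with
  | nil => simp
  | cons x xs ihx =>
    rw [List.countP_cons, List.countP_cons, List.count_cons, ihx]
    by_cases hxw : x = w
    · subst hxw
      simp [hw]
      omega
    · by_cases hxL : x ∈ L <;> simp [List.mem_cons, hxw, hxL]; omega

-- sum over a duplicate-free list of per-word counts = one countP over the tokens
lemma pv_sum_count_eq_countP (L : List String) (hL : L.Nodup) (xs : List String) :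
    (L.map (fun w => List.count w xs)).sum = xs.countP (fun x => decide (x ∈ L)) := by
  induction L with
  | nil => simp
  | cons w L ih =>
    have hw : w ∉ L := (List.nodup_cons.mp hL).1
    have hL' : L.Nodup := (List.nodup_cons.mp hL).2
    simp only [List.map_cons, List.sum_cons, ih hL']
    rw [pv_countP_cons_split w L hw xs]

theorem first_person_pronouns_spec : Claim_equal_first_person_pronouns := by
  intro tl _
  unfold Spec_first_person_pronouns first_person_pronouns first_person_pronouns_alt
  have hfun :
      (fun (count : Int) (item : String) =>
        if (pvTitle item ∈ (["i", "me", "my", "mine", "we", "us", "our", "ours"] : List String)) ∨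
           (PySem.Str.lower item ∈ (["i", "me", "my", "mine", "we", "us", "our", "ours"] : List String)) ∨
           (item ∈ (["i", "me", "my", "mine", "we", "us", "our", "ours"] : List String)) ∨
           (PySem.Str.upper item ∈ (["i", "me", "my", "mine", "we", "us", "our", "ours"] : List String))
        then count + 1 else count)
    = (fun (count : Int) (item : String) =>
        if (fun s => decide (PySem.Str.lower s ∈ (["i", "me", "my", "mine", "we", "us", "our", "ours"] : List String))) item = true
        then count + 1 else count) := by
    funext count item
    by_cases h : PySem.Str.lower item ∈ (["i", "me", "my", "mine", "we", "us", "our", "ours"] : List String)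
    · rw [if_pos ((pv_cond_iff item).mpr h), if_pos (by simp [h])]
    · rw [if_neg (fun hc => h ((pv_cond_iff item).mp hc)), if_neg (by simp [h])]
  show List.foldl _ 0 tl = _
  rw [hfun, PySem.List.foldl_count_if]
  dsimp only
  rw [show (List.foldl (fun (d : PySem.Dict String Int) item =>
          d.insert (PySem.Str.lower item) (d.getD (PySem.Str.lower item) 0 + 1)) PySem.Dict.empty tl)
        = PySem.Dict.counter (tl.map PySem.Str.lower) by
      rw [← PySem.Dict.foldl_insert_getD_add_one_eq_counter, List.foldl_map],
    ]
  simp only [PySem.Dict.getD_counter]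
  rw [show (List.map (fun word => (List.count word (tl.map PySem.Str.lower) : Int))
        (["i", "me", "my", "mine", "we", "us", "our", "ours"] : List String)).sum
      = ((List.map (fun word => List.count word (tl.map PySem.Str.lower))
        (["i", "me", "my", "mine", "we", "us", "our", "ours"] : List String)).sum : Int) by
    rw [Nat.cast_list_sum, List.map_map]; rfl]
  rw [pv_sum_count_eq_countP _ (by decide) (tl.map PySem.Str.lower), List.countP_map]
  rw [zero_add]
  exact congrArg Nat.cast (List.countP_congr (by intro x _; simp [Function.comp]))
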